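-- pv_equiv track=rewrite | github.com/KasraNezamabadi/InterviewPractice | HardPractice4.py | find_shortest_dist
-- ===== SOURCE A (Python) =====
-- def find_shortest_dist(input_list: [str], word1: str, word2: str):
--
--     word1_last_loc = -1
--     word2_last_loc = -1
--     min_distance = len(input_list)
--     locs = ()
--
--     for i in range(len(input_list)):
--
--         word = input_list[i]
--
--         if word == word1:
--             word1_last_loc = i
--         elif word == word2:
--             word2_last_loc = i
--
--     if word1_last_loc > -1 and word2_last_loc > -1:
--         dist = abs(word1_last_loc - word2_last_loc)
--         if dist < min_distance:
--             min_distance = dist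
--             locs = (word1_last_loc, word2_last_loc)
--
--     return locs[0], locs[1], min_distance
-- ===== SOURCE B (Python) =====
-- def find_shortest_dist(input_list, word1, word2):
--     i1 = -1
--     i2 = -1
--     for i in reversed(range(len(input_list))):
--         w = input_list[i]
--         if i1 < 0 and w == word1:
--             i1 = i
--         elif i2 < 0 and w == word2:
--             i2 = i
--         if i1 >= 0 and i2 >= 0:
--             return i1, i2, abs(i1 - i2)
--     raise ValueError("both words must occur in input_list")
-- ===== Notes on version B (the rewrite author's own statement) =====
-- stated objective: alternative
-- what changed: B scans backwards from the end, freezing each word's index at its first (i.e. last-overall) hit and breaking as soon as both are found, instead of A's full forward scan plus a post-loop distance/locs block; the min_distance bookkeeping disappears since the distance of two valid indices is always below len.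
import Mathlib
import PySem

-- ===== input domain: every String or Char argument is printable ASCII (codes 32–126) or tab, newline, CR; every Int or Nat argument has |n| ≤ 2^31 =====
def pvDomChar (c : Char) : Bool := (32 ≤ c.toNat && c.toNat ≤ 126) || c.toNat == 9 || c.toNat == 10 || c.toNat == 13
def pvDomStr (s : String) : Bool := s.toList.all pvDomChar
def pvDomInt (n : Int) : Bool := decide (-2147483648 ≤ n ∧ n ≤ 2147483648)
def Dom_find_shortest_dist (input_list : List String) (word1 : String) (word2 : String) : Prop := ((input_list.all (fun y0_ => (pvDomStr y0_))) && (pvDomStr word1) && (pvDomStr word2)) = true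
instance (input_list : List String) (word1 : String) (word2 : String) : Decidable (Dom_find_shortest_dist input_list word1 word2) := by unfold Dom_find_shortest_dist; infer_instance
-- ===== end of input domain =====

-- B replaces A's full forward scan + post-loop locs/min_distance block by a backward scan
-- that freezes each word's last index on first hit and breaks early (alternative decomposition).


-- ===== PORT A =====
-- A's forward loop 'for i in range(len)' over (word1_last_loc, word2_last_loc), index carried as accumulator
def aLoop (w1 w2 : String) : List String → Int → Int × Int → Int × Int
  | [], _, s => s
  | x :: t, i, (l1, l2) =>
      aLoop w1 w2 t (i + 1)
        (if x = w1 then (i, l2) else if x = w2 then (l1, i) else (l1, l2))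

def find_shortest_dist (input_list : List String) (word1 : String) (word2 : String) : Int × Int × Int :=
  let n : Int := input_list.length
  let p := aLoop word1 word2 input_list 0 (-1, -1)
  if p.1 > -1 ∧ p.2 > -1 then
    let dist := |p.1 - p.2|
    if dist < n then (p.1, p.2, dist)
    else (-1, -1, n)  -- locs = (): Python raises IndexError at locs[0]; excluded by Pre_
  else (-1, -1, n)    -- locs = (): Python raises IndexError at locs[0]; excluded by Pre_

-- ===== PORT B =====
-- B's backward loop 'for i in reversed(range(len))'; fuel k means current index k-1;
-- some = the in-loop 'return i1, i2, abs(i1 - i2)', none = the loop fell through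
def altLoop (xs : List String) (w1 w2 : String) : Nat → Int → Int → Option (Int × Int)
  | 0, _, _ => none
  | k + 1, i1, i2 =>
      let w := (PySem.List.pyGet? xs (k : Int)).getD ""
      let i1' := if i1 < 0 ∧ w = w1 then (k : Int) else i1
      let i2' := if ¬(i1 < 0 ∧ w = w1) ∧ i2 < 0 ∧ w = w2 then (k : Int) else i2
      if 0 ≤ i1' ∧ 0 ≤ i2' then some (i1', i2')
      else altLoop xs w1 w2 k i1' i2'

def find_shortest_dist_alt (input_list : List String) (word1 : String) (word2 : String) : Int × Int × Int :=
  match altLoop input_list word1 word2 input_list.length (-1) (-1) with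
  | some (a, b) => (a, b, |a - b|)
  | none => (-1, -1, input_list.length)  -- Python raises ValueError here; excluded by Pre_

-- ===== PRECONDITION & SPEC =====
-- Pre_ excludes exactly the inputs where A raises IndexError on locs[0]:
-- a missing word, or word1 == word2 (the elif then never records word2).
def Pre_find_shortest_dist (input_list : List String) (word1 : String) (word2 : String) : Prop :=
  word1 ∈ input_list ∧ word2 ∈ input_list ∧ word1 ≠ word2
instance (input_list : List String) (word1 : String) (word2 : String) : Decidable (Pre_find_shortest_dist input_list word1 word2) := by unfold Pre_find_shortest_dist; infer_instance

def pvWitness_find_shortest_dist : List String × String × String := (["a", "b", "a"], "a", "b")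

def Spec_find_shortest_dist (input_list : List String) (word1 : String) (word2 : String) (out : Int × Int × Int) : Prop := out = find_shortest_dist_alt input_list word1 word2
instance (input_list : List String) (word1 : String) (word2 : String) (out : Int × Int × Int) : Decidable (Spec_find_shortest_dist input_list word1 word2 out) := by unfold Spec_find_shortest_dist; infer_instance

-- ===== CLAIM (what is proved, stated in full; the proofs are below) =====
def Claim_equal_find_shortest_dist : Prop := ∀ (input_list : List String) (word1 : String) (word2 : String), Dom_find_shortest_dist input_list word1 word2 → Pre_find_shortest_dist input_list word1 word2 → Spec_find_shortest_dist input_list word1 word2 (find_shortest_dist input_list word1 word2)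


-- ===== LEMMAS AND PROOFS =====

-- index of the last occurrence of w in xs, -1 if none (common characterisation of both loops)
def lastQ : List String → String → Int
  | [], _ => -1
  | x :: t, w => if lastQ t w ≥ 0 then lastQ t w + 1 else if x = w then 0 else -1

theorem lastQ_bounds (xs : List String) (w : String) : -1 ≤ lastQ xs w ∧ lastQ xs w < xs.length := by
  induction xs with
  | nil => simp [lastQ]
  | cons x t ih =>
      simp only [lastQ, List.length_cons]
      push_cast
      split_ifs <;> omega

theorem lastQ_nonneg_iff (xs : List String) (w : String) : 0 ≤ lastQ xs w ↔ w ∈ xs := by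
  induction xs with
  | nil => simp [lastQ]
  | cons x t ih =>
      simp only [lastQ, List.mem_cons]
      have hb := lastQ_bounds t w
      by_cases h1 : lastQ t w ≥ 0
      · rw [if_pos h1]
        exact ⟨fun _ => Or.inr (ih.mp h1), fun _ => by omega⟩
      · rw [if_neg h1]
        by_cases h2 : x = w
        · simp [h2]
        · rw [if_neg h2]
          constructor
          · intro hc; omega
          · rintro (rfl | hm)
            · exact absurd rfl h2
            · exact absurd (ih.mpr hm) h1

theorem aLoop_spec (w1 w2 : String) (h : w1 ≠ w2) :
    ∀ (t : List String) (i l1 l2 : Int),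
      aLoop w1 w2 t i (l1, l2) =
        ((if lastQ t w1 ≥ 0 then lastQ t w1 + i else l1),
         (if lastQ t w2 ≥ 0 then lastQ t w2 + i else l2)) := by
  intro t
  induction t with
  | nil => intro i l1 l2; simp [aLoop, lastQ]
  | cons x t ih =>
      intro i l1 l2
      have hb1 := lastQ_bounds t w1
      have hb2 := lastQ_bounds t w2
      by_cases hx1 : x = w1
      · have hx2 : ¬ x = w2 := fun hc => h (hx1.symm.trans hc)
        simp only [aLoop, lastQ, if_pos hx1, if_neg hx2, ih]
        simp only [Prod.mk.injEq]
        constructor <;> split_ifs <;> omega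
      · by_cases hx2 : x = w2
        · simp only [aLoop, lastQ, if_pos hx2, if_neg hx1, ih]
          simp only [Prod.mk.injEq]
          constructor <;> split_ifs <;> omega
        · simp only [aLoop, lastQ, if_neg hx1, if_neg hx2, ih]
          simp only [Prod.mk.injEq]
          constructor <;> split_ifs <;> omega

theorem lastQ_append_singleton (l : List String) (x : String) (w : String) :
    lastQ (l ++ [x]) w = if x = w then (l.length : Int) else lastQ l w := by
  induction l with
  | nil =>
      simp only [List.nil_append, lastQ, List.length_nil]
      split_ifs <;> simp_all
  | cons y t ih =>
      have hb := lastQ_bounds t w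
      have hb' := lastQ_bounds (t ++ [x]) w
      simp only [List.cons_append, lastQ, ih, List.length_cons]
      push_cast
      split_ifs <;> omega

theorem lastQ_take_succ (xs : List String) (w : String) (k : Nat) (hk : k < xs.length) :
    lastQ (xs.take (k + 1)) w = if xs[k] = w then (k : Int) else lastQ (xs.take k) w := by
  rw [List.take_add_one, List.getElem?_eq_getElem hk, Option.toList_some,
    lastQ_append_singleton]
  simp [List.length_take, Nat.min_eq_left (le_of_lt hk)]

theorem altLoop_spec (xs : List String) (w1 w2 : String) (h : w1 ≠ w2) :
    ∀ (k : Nat), k ≤ xs.length → ∀ (i1 i2 : Int), -1 ≤ i1 → -1 ≤ i2 → ¬ (0 ≤ i1 ∧ 0 ≤ i2) →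
      altLoop xs w1 w2 k i1 i2 =
        (if 0 ≤ (if 0 ≤ i1 then i1 else lastQ (xs.take k) w1)
            ∧ 0 ≤ (if 0 ≤ i2 then i2 else lastQ (xs.take k) w2)
         then some ((if 0 ≤ i1 then i1 else lastQ (xs.take k) w1),
                    (if 0 ≤ i2 then i2 else lastQ (xs.take k) w2))
         else none) := by
  intro k
  induction k with
  | zero =>
      intro _ i1 i2 h1 h2 hne
      simp only [altLoop, List.take_zero, lastQ]
      rw [if_neg (by split_ifs <;> omega)]
  | succ k ih =>
      intro hk i1 i2 h1 h2 hne
      have hklt : k < xs.length := by omega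
      have hw : (PySem.List.pyGet? xs (k : Int)).getD "" = xs[k] := by
        rw [PySem.List.pyGet?_natCast, List.getElem?_eq_getElem hklt]; rfl
      have ht1 := lastQ_take_succ xs w1 k hklt
      have ht2 := lastQ_take_succ xs w2 k hklt
      have hbt1 := lastQ_bounds (xs.take k) w1
      have hbt2 := lastQ_bounds (xs.take k) w2
      simp only [altLoop, hw]
      set a1 : Int := if i1 < 0 ∧ xs[k] = w1 then (k : Int) else i1 with ha1
      set a2 : Int := if ¬(i1 < 0 ∧ xs[k] = w1) ∧ i2 < 0 ∧ xs[k] = w2 then (k : Int) else i2 with ha2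
      have key1 : (if 0 ≤ a1 then a1 else lastQ (xs.take k) w1)
                = (if 0 ≤ i1 then i1 else lastQ (xs.take (k + 1)) w1) := by
        by_cases hx1 : xs[k] = w1
        · rw [ht1, if_pos hx1]
          by_cases hi1 : i1 < 0
          · rw [ha1, if_pos (show i1 < 0 ∧ xs[k] = w1 from ⟨hi1, hx1⟩)]
            split_ifs <;> omega
          · rw [ha1, if_neg (show ¬ (i1 < 0 ∧ xs[k] = w1) from fun hc => hi1 hc.1)]
            split_ifs <;> omega
        · rw [ht1, if_neg hx1, ha1,
            if_neg (show ¬ (i1 < 0 ∧ xs[k] = w1) from fun hc => hx1 hc.2)]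
      have key2 : (if 0 ≤ a2 then a2 else lastQ (xs.take k) w2)
                = (if 0 ≤ i2 then i2 else lastQ (xs.take (k + 1)) w2) := by
        by_cases hx2 : xs[k] = w2
        · have hx1 : ¬ xs[k] = w1 := fun hc => h (hc.symm.trans hx2)
          rw [ht2, if_pos hx2]
          by_cases hi2 : i2 < 0
          · rw [ha2, if_pos (show ¬(i1 < 0 ∧ xs[k] = w1) ∧ i2 < 0 ∧ xs[k] = w2 from
              ⟨fun hc => hx1 hc.2, hi2, hx2⟩)]
            split_ifs <;> omega
          · rw [ha2, if_neg (show ¬ (¬(i1 < 0 ∧ xs[k] = w1) ∧ i2 < 0 ∧ xs[k] = w2) from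
              fun hc => hi2 hc.2.1)]
            split_ifs <;> omega
        · rw [ht2, if_neg hx2, ha2,
            if_neg (show ¬ (¬(i1 < 0 ∧ xs[k] = w1) ∧ i2 < 0 ∧ xs[k] = w2) from
              fun hc => hx2 hc.2.2)]
      have hA1 : -1 ≤ a1 := by rw [ha1]; split_ifs <;> omega
      have hA2 : -1 ≤ a2 := by rw [ha2]; split_ifs <;> omega
      by_cases hbr : 0 ≤ a1 ∧ 0 ≤ a2
      · rw [if_pos hbr]
        have q1 : a1 = (if 0 ≤ i1 then i1 else lastQ (xs.take (k + 1)) w1) := by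
          rw [← key1, if_pos hbr.1]
        have q2 : a2 = (if 0 ≤ i2 then i2 else lastQ (xs.take (k + 1)) w2) := by
          rw [← key2, if_pos hbr.2]
        rw [← q1, ← q2, if_pos hbr]
      · rw [if_neg hbr, ih (by omega) a1 a2 hA1 hA2 hbr, key1, key2]

-- ===== VERDICT (by name: the statement is the Claim_ definition above) =====
theorem find_shortest_dist_spec : Claim_equal_find_shortest_dist := by
  intro xs w1 w2 _ hpre
  obtain ⟨hm1, hm2, hne⟩ := hpre
  unfold Spec_find_shortest_dist find_shortest_dist find_shortest_dist_alt
  have hA := aLoop_spec w1 w2 hne xs 0 (-1) (-1)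
  have hB := altLoop_spec xs w1 w2 hne xs.length le_rfl (-1) (-1) (by norm_num) (by norm_num)
    (by norm_num)
  have hl1 := (lastQ_nonneg_iff xs w1).mpr hm1
  have hl2 := (lastQ_nonneg_iff xs w2).mpr hm2
  have hb1 := lastQ_bounds xs w1
  have hb2 := lastQ_bounds xs w2
  rw [hA, hB]
  simp only [List.take_length, if_pos (by omega : lastQ xs w1 ≥ 0),
    if_pos (by omega : lastQ xs w2 ≥ 0), if_neg (by norm_num : ¬ (0:Int) ≤ -1), add_zero]
  rw [if_pos (⟨by omega, by omega⟩ : lastQ xs w1 > -1 ∧ lastQ xs w2 > -1),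
    if_pos (by rw [abs_sub_lt_iff]; omega),
    if_pos (show 0 ≤ lastQ xs w1 ∧ 0 ≤ lastQ xs w2 from ⟨hl1, hl2⟩)]
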